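-- pv_equiv track=rewrite | github.com/ucjaiswal/scenescape | manager/src/manager/validators.py | is_polycam_dataset
-- ===== SOURCE A (Python) =====
-- def is_polycam_dataset(basefilename, filenames, is_map_glb):
--   """! Verify required polycam dataset structure.
--
--   @param  basefilename   Dataset files path prefix
--   @param  filenames      List of files in the dataset zip file
--   @return boolean        Is the input a valid polycam dataset
--   """
--   prefix = f"{basefilename}/" if basefilename else ""
--
--   if f"{prefix}mesh_info.json" not in filenames:
--     return False, f"Missing {prefix}mesh_info.json file"
--
--   if not is_map_glb and f"{prefix}raw.glb" not in filenames:
--     return False, f"Missing {prefix}raw.glb file. This is required unless map is a glb file."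
--
--   keyframes = [f for f in filenames if f.startswith(f"{prefix}keyframes/")]
--   if not keyframes:
--     return False, "Missing keyframes folder"
--
--   images = [f for f in keyframes if "/images/" in f and f.endswith(".jpg")]
--   depth = [f for f in keyframes if "/depth/" in f and f.endswith(".png")]
--   cameras = [f for f in keyframes if "/cameras/" in f and f.endswith(".json")]
--
--   counts = [len(images), len(depth), len(cameras)]
--   if not (counts[0] == counts[1] == counts[2] > 0):
--     return False, f"Image count mismatch: {counts[0]} images, {counts[1]} depth, {counts[2]} cameras"
--
--   return True, None
-- ===== SOURCE B (Python) =====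
-- def _category(f):
--   """Each file falls in at most one category: the suffixes .jpg/.png/.json are mutually exclusive."""
--   if f.endswith(".jpg") and "/images/" in f:
--     return "images"
--   if f.endswith(".png") and "/depth/" in f:
--     return "depth"
--   if f.endswith(".json") and "/cameras/" in f:
--     return "cameras"
--   return "other"
--
--
-- def is_polycam_dataset(basefilename, filenames, is_map_glb):
--   prefix = f"{basefilename}/" if basefilename else ""
--
--   if f"{prefix}mesh_info.json" not in filenames:
--     return False, f"Missing {prefix}mesh_info.json file"
--
--   if not is_map_glb and f"{prefix}raw.glb" not in filenames:
--     return False, f"Missing {prefix}raw.glb file. This is required unless map is a glb file."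
--
--   kp = f"{prefix}keyframes/"
--   tally = {}
--   for f in filenames:
--     if f.startswith(kp):
--       tally[_category(f)] = tally.get(_category(f), 0) + 1
--
--   if not tally:
--     return False, "Missing keyframes folder"
--
--   i, d, c = tally.get("images", 0), tally.get("depth", 0), tally.get("cameras", 0)
--   if not (i == d == c > 0):
--     return False, f"Image count mismatch: {i} images, {d} depth, {c} cameras"
--
--   return True, None
-- ===== Notes on version B (the rewrite author's own statement) =====
-- stated objective: alternative
-- what changed: B replaces A's four independent filter passes with a classifier that maps every keyframe file to exactly one category (correct because the .jpg/.png/.json suffix tests are mutually exclusive) and a dict tally built in one pass; the keyframes-folder check becomes emptiness of the tally instead of a materialized list.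
import Mathlib
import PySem

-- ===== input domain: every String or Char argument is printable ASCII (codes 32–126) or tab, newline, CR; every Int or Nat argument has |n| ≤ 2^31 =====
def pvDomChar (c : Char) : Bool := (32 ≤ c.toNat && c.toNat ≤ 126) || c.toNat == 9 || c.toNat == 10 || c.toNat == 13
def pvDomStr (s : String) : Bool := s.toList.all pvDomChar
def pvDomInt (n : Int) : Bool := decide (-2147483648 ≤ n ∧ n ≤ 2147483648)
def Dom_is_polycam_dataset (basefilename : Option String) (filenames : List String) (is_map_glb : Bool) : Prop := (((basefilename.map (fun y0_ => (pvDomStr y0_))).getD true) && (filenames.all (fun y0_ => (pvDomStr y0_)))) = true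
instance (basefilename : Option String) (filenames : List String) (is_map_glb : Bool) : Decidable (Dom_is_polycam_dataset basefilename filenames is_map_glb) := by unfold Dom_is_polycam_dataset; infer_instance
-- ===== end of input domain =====

-- B classifies each keyframe file into exactly one category (the suffix tests are mutually
-- exclusive) and tallies categories in a dict in one pass; return values proved identical to A.

-- ===== PORT A =====
def is_polycam_dataset (basefilename : Option String) (filenames : List String) (is_map_glb : Bool) : Bool × Option String :=
  let pfx : String := match basefilename with
    | none => ""
    | some s => if s == "" then "" else s ++ "/"
  if !(filenames.contains (pfx ++ "mesh_info.json")) then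
    (false, some ("Missing " ++ pfx ++ "mesh_info.json file"))
  else if !is_map_glb && !(filenames.contains (pfx ++ "raw.glb")) then
    (false, some ("Missing " ++ pfx ++ "raw.glb file. This is required unless map is a glb file."))
  else
    let keyframes := filenames.filter (fun f => PySem.Str.startswith f (pfx ++ "keyframes/"))
    if keyframes.isEmpty then
      (false, some "Missing keyframes folder")
    else
      let images := keyframes.filter (fun f => PySem.Str.isIn "/images/" f && PySem.Str.endswith f ".jpg")
      let depth := keyframes.filter (fun f => PySem.Str.isIn "/depth/" f && PySem.Str.endswith f ".png")
      let cameras := keyframes.filter (fun f => PySem.Str.isIn "/cameras/" f && PySem.Str.endswith f ".json")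
      let c0 : Int := images.length
      let c1 : Int := depth.length
      let c2 : Int := cameras.length
      if !(c0 == c1 && c1 == c2 && c2 > 0) then
        (false, some ("Image count mismatch: " ++ PySem.Int.toStr c0 ++ " images, " ++ PySem.Int.toStr c1 ++ " depth, " ++ PySem.Int.toStr c2 ++ " cameras"))
      else
        (true, none)

-- ===== PORT B =====
def pvCategory (f : String) : String :=
  if PySem.Str.endswith f ".jpg" && PySem.Str.isIn "/images/" f then "images"
  else if PySem.Str.endswith f ".png" && PySem.Str.isIn "/depth/" f then "depth"
  else if PySem.Str.endswith f ".json" && PySem.Str.isIn "/cameras/" f then "cameras"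
  else "other"

def is_polycam_dataset_alt (basefilename : Option String) (filenames : List String) (is_map_glb : Bool) : Bool × Option String :=
  let pfx : String := match basefilename with
    | none => ""
    | some s => if s == "" then "" else s ++ "/"
  if !(filenames.contains (pfx ++ "mesh_info.json")) then
    (false, some ("Missing " ++ pfx ++ "mesh_info.json file"))
  else if !is_map_glb && !(filenames.contains (pfx ++ "raw.glb")) then
    (false, some ("Missing " ++ pfx ++ "raw.glb file. This is required unless map is a glb file."))
  else
    let kp := pfx ++ "keyframes/"
    let tally : PySem.Dict String Int := filenames.foldl
      (fun d f => if PySem.Str.startswith f kp then d.insert (pvCategory f) (d.getD (pvCategory f) 0 + 1) else d)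
      PySem.Dict.empty
    if tally.size == 0 then
      (false, some "Missing keyframes folder")
    else
      let i := tally.getD "images" 0
      let d := tally.getD "depth" 0
      let c := tally.getD "cameras" 0
      if !(i == d && d == c && c > 0) then
        (false, some ("Image count mismatch: " ++ PySem.Int.toStr i ++ " images, " ++ PySem.Int.toStr d ++ " depth, " ++ PySem.Int.toStr c ++ " cameras"))
      else
        (true, none)

-- ===== PRECONDITION & SPEC =====
def Spec_is_polycam_dataset (basefilename : Option String) (filenames : List String) (is_map_glb : Bool) (out : Bool × Option String) : Prop := out = is_polycam_dataset_alt basefilename filenames is_map_glb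
instance (basefilename : Option String) (filenames : List String) (is_map_glb : Bool) (out : Bool × Option String) : Decidable (Spec_is_polycam_dataset basefilename filenames is_map_glb out) := by unfold Spec_is_polycam_dataset; infer_instance

-- ===== CLAIM (what is proved, stated in full; the proofs are below) =====
def Claim_equal_is_polycam_dataset : Prop := ∀ (basefilename : Option String) (filenames : List String) (is_map_glb : Bool), Dom_is_polycam_dataset basefilename filenames is_map_glb → Spec_is_polycam_dataset basefilename filenames is_map_glb (is_polycam_dataset basefilename filenames is_map_glb)

-- ===== LEMMAS AND PROOFS =====

-- A guarded fold is a fold over the filtered list (shape of B's loop).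
theorem pv_foldl_guard {α β : Type} (p : α → Bool) (g : β → α → β) (l : List α) (init : β) :
    l.foldl (fun d f => if p f then g d f else d) init = (l.filter p).foldl g init := by
  induction l generalizing init with
  | nil => rfl
  | cons x l ih => by_cases h : p x <;> simp [h, ih]

-- the three suffix tests are mutually exclusive (no two of .jpg/.png/.json are suffixes of one string)
theorem pv_endswith_excl (f p q : String) (hp : ¬ p.toList <:+ q.toList) (hq : ¬ q.toList <:+ p.toList) :
    (PySem.Str.endswith f p && PySem.Str.endswith f q) = false := by
  cases h1 : PySem.Str.endswith f p with
  | false => rfl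
  | true =>
    cases h2 : PySem.Str.endswith f q with
    | false => rfl
    | true =>
      exfalso
      simp only [PySem.Str.endswith_eq] at h1 h2
      rw [PySem.Chars.endswith_iff] at h1 h2
      rcases List.suffix_or_suffix_of_suffix h1 h2 with h | h
      exacts [hp h, hq h]

theorem pv_suffix_excl (f : String) :
    (PySem.Str.endswith f ".jpg" && PySem.Str.endswith f ".png") = false ∧
    (PySem.Str.endswith f ".jpg" && PySem.Str.endswith f ".json") = false ∧
    (PySem.Str.endswith f ".png" && PySem.Str.endswith f ".json") = false :=
  ⟨pv_endswith_excl f _ _ (by decide) (by decide),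
   pv_endswith_excl f _ _ (by decide) (by decide),
   pv_endswith_excl f _ _ (by decide) (by decide)⟩

-- B's classifier matches A's three filter predicates
theorem pv_cat_images (f : String) :
    (pvCategory f == "images") = (PySem.Str.isIn "/images/" f && PySem.Str.endswith f ".jpg") := by
  obtain ⟨e1, e2, e3⟩ := pv_suffix_excl f
  unfold pvCategory
  cases h1 : PySem.Str.endswith f ".jpg" <;> cases h2 : PySem.Str.endswith f ".png" <;>
    cases h3 : PySem.Str.endswith f ".json" <;> simp_all <;> split_ifs <;> simp_all

theorem pv_cat_depth (f : String) :
    (pvCategory f == "depth") = (PySem.Str.isIn "/depth/" f && PySem.Str.endswith f ".png") := by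
  obtain ⟨e1, e2, e3⟩ := pv_suffix_excl f
  unfold pvCategory
  cases h1 : PySem.Str.endswith f ".jpg" <;> cases h2 : PySem.Str.endswith f ".png" <;>
    cases h3 : PySem.Str.endswith f ".json" <;> simp_all <;> split_ifs <;> simp_all

theorem pv_cat_cameras (f : String) :
    (pvCategory f == "cameras") = (PySem.Str.isIn "/cameras/" f && PySem.Str.endswith f ".json") := by
  obtain ⟨e1, e2, e3⟩ := pv_suffix_excl f
  unfold pvCategory
  cases h1 : PySem.Str.endswith f ".jpg" <;> cases h2 : PySem.Str.endswith f ".png" <;>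
    cases h3 : PySem.Str.endswith f ".json" <;> simp_all <;> split_ifs <;> simp_all

-- B's tally is the counter of the classified keyframe files
theorem pv_tally_eq (kp : String) (l : List String) :
    l.foldl (fun d f => if PySem.Str.startswith f kp then d.insert (pvCategory f) (d.getD (pvCategory f) 0 + 1) else d) PySem.Dict.empty
    = PySem.Dict.counter ((l.filter (fun f => PySem.Str.startswith f kp)).map pvCategory) := by
  rw [pv_foldl_guard, ← PySem.Dict.foldl_insert_getD_add_one_eq_counter, List.foldl_map]

theorem pv_counter_size_eq_zero {κ : Type} [BEq κ] [LawfulBEq κ] (xs : List κ) :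
    (PySem.Dict.counter xs).size = 0 ↔ xs = [] := by
  have h : (PySem.Dict.counter xs).size = (PySem.Set.ofList xs).length := by
    simp [PySem.Dict.size, PySem.Dict.items_counter]
  rw [h]
  cases xs with
  | nil => simp
  | cons x t =>
    constructor
    · intro hlen
      exfalso
      have hx : x ∈ PySem.Set.ofList (x :: t) := by
        rw [PySem.Set.mem_ofList]; exact List.mem_cons_self
      have := List.length_pos_of_mem hx
      omega
    · intro h; exact absurd h (List.cons_ne_nil x t)

-- the size test of B's tally is A's emptiness test of the keyframes list
theorem pv_size_eq (l : List String) :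
    ((PySem.Dict.counter (l.map pvCategory)).size == 0) = l.isEmpty := by
  cases l with
  | nil => rfl
  | cons x t =>
    have h : ¬ (PySem.Dict.counter (pvCategory x :: List.map pvCategory t)).size = 0 := by
      rw [pv_counter_size_eq_zero]; simp
    simp [h]

-- a category count in B is the corresponding filtered length in A
theorem pv_count_map_cat (l : List String) (k : String) (q : String → Bool)
    (hq : ∀ f, (pvCategory f == k) = q f) :
    (((l.map pvCategory).count k : Nat) : Int) = (((l.filter q).length : Nat) : Int) := by
  induction l with
  | nil => rfl
  | cons x t ih =>
    simp only [List.map_cons, List.count_cons, List.filter_cons, hq x]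
    by_cases h : q x = true <;> simp [h] <;> omega

theorem pv_count_images (l : List String) :
    (((l.map pvCategory).count "images" : Nat) : Int) = (((l.filter (fun f => PySem.Str.isIn "/images/" f && PySem.Str.endswith f ".jpg")).length : Nat) : Int) :=
  pv_count_map_cat l _ _ pv_cat_images

theorem pv_count_depth (l : List String) :
    (((l.map pvCategory).count "depth" : Nat) : Int) = (((l.filter (fun f => PySem.Str.isIn "/depth/" f && PySem.Str.endswith f ".png")).length : Nat) : Int) :=
  pv_count_map_cat l _ _ pv_cat_depth

theorem pv_count_cameras (l : List String) :
    (((l.map pvCategory).count "cameras" : Nat) : Int) = (((l.filter (fun f => PySem.Str.isIn "/cameras/" f && PySem.Str.endswith f ".json")).length : Nat) : Int) :=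
  pv_count_map_cat l _ _ pv_cat_cameras

-- ===== VERDICT (by name: the statement is the Claim_ definition above) =====
theorem is_polycam_dataset_spec : Claim_equal_is_polycam_dataset := by
  intro bf fns glb _
  unfold Spec_is_polycam_dataset is_polycam_dataset is_polycam_dataset_alt
  simp only [pv_tally_eq, pv_size_eq, PySem.Dict.getD_counter, pv_count_images, pv_count_depth,
    pv_count_cameras]
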